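-- pv_equiv track=rewrite | github.com/eagitR/temp_repo | sourceFiles/finalVersions/logDataExtractionCodes/logDataExtractionCodes_final.py | isSCF_OrderTrueFirst
-- ===== SOURCE A (Python) =====
-- def isSCF_OrderTrueFirst(x):
--     # checking order by the first appearence
--     names_inds = {'SYMPTOM': 1, 'CLASSIFICATIONS': 2, 'FEEDBACK': 3}
--
--     inds_ = []
--     namesToNow = set();
--     for name in x:
--         if name not in namesToNow:
--             namesToNow.add(name)
--             inds_.append(names_inds[name])
--
--     if len(inds_) == 1:
--         return True
--
--     if sum([y < 0 for y in [i - j for i, j in zip(inds_[1:], inds_[:-1])]]) > 0: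
--         return False
--     else:
--         return True
-- ===== SOURCE B (Python) =====
-- def isSCF_OrderTrueFirst(x):
--     # single pass: running-max check over first-appearance indices
--     names_inds = {'SYMPTOM': 1, 'CLASSIFICATIONS': 2, 'FEEDBACK': 3}
--     seen = set()
--     last = 0
--     for name in x:
--         if name not in seen:
--             seen.add(name)
--             i = names_inds[name]
--             if i < last:
--                 return False
--             last = i
--     return True
-- ===== Notes on version B (the rewrite author's own statement) =====
-- stated objective: simpler
-- what changed: Collapses A's two phases (collect first-appearance indices, then a zip/map/sum pairwise-difference test) into one loop keeping only a seen-set and the previous index, returning False on the first decrease.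
import Mathlib
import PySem

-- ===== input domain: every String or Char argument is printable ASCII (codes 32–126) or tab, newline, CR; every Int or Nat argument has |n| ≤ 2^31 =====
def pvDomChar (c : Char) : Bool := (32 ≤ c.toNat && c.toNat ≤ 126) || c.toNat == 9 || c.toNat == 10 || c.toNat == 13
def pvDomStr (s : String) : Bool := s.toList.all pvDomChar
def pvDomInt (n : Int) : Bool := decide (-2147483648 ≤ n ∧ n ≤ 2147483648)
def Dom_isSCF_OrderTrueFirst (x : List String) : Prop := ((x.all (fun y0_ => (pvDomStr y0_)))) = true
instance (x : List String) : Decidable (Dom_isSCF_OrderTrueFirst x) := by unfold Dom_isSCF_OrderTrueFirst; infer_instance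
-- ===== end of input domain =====

-- B collapses A's two phases into a single pass with a seen-set and a running previous index.
-- Same return value on every input where A returns (Pre_ excludes names outside the fixed dict, where both raise KeyError).

-- names_inds = {'SYMPTOM': 1, 'CLASSIFICATIONS': 2, 'FEEDBACK': 3}
def namesInds : PySem.Dict String Int :=
  PySem.Dict.ofList [("SYMPTOM", 1), ("CLASSIFICATIONS", 2), ("FEEDBACK", 3)]

-- ===== PORT A =====
-- the collecting loop: (inds_, namesToNow) accumulated by foldl; names_inds[name] via getD
-- (Pre_ guarantees the key is present, so the default is never consulted inside Pre_)
def isSCF_OrderTrueFirst (x : List String) : Bool :=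
  let st := x.foldl
    (fun (p : List Int × PySem.Set String) name =>
      if name ∈ p.2 then p
      else (p.1 ++ [PySem.Dict.getD namesInds name 0], PySem.Set.add p.2 name))
    ([], PySem.Set.empty)
  let inds := st.1
  if inds.length = 1 then true
  else
    -- sum([y < 0 for y in [i - j for i, j in zip(inds_[1:], inds_[:-1])]]) > 0
    if (((inds.drop 1).zip inds.dropLast).map
          (fun (ij : Int × Int) => if ij.1 - ij.2 < 0 then (1 : Int) else 0)).sum > 0
    then false else true

-- ===== PORT B =====
def altGo : List String → PySem.Set String → Int → Bool
  | [], _, _ => true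
  | name :: rest, seen, last =>
    if name ∈ seen then altGo rest seen last
    else
      let i := PySem.Dict.getD namesInds name 0
      if i < last then false else altGo rest (PySem.Set.add seen name) i

def isSCF_OrderTrueFirst_alt (x : List String) : Bool :=
  altGo x PySem.Set.empty 0

-- ===== PRECONDITION & SPEC =====
-- Pre_ excludes lists containing a name outside the three-key dict: A (and B) raise KeyError there.
def Pre_isSCF_OrderTrueFirst (x : List String) : Prop :=
  ∀ s ∈ x, s = "SYMPTOM" ∨ s = "CLASSIFICATIONS" ∨ s = "FEEDBACK"
instance (x : List String) : Decidable (Pre_isSCF_OrderTrueFirst x) := by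
  unfold Pre_isSCF_OrderTrueFirst; infer_instance

def pvWitness_isSCF_OrderTrueFirst : List String := ["SYMPTOM", "CLASSIFICATIONS", "SYMPTOM"]

def Spec_isSCF_OrderTrueFirst (x : List String) (out : Bool) : Prop := out = isSCF_OrderTrueFirst_alt x
instance (x : List String) (out : Bool) : Decidable (Spec_isSCF_OrderTrueFirst x out) := by unfold Spec_isSCF_OrderTrueFirst; infer_instance

-- ===== CLAIM (what is proved, stated in full; the proofs are below) =====
def Claim_equal_isSCF_OrderTrueFirst : Prop := ∀ (x : List String), Dom_isSCF_OrderTrueFirst x → Pre_isSCF_OrderTrueFirst x → Spec_isSCF_OrderTrueFirst x (isSCF_OrderTrueFirst x)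

-- ===== LEMMAS AND PROOFS =====

-- the list of indices of first appearances, starting from a given seen-set
def indsOf : List String → PySem.Set String → List Int
  | [], _ => []
  | n :: r, s =>
    if n ∈ s then indsOf r s
    else PySem.Dict.getD namesInds n 0 :: indsOf r (PySem.Set.add s n)

lemma foldlA_eq (x : List String) (acc : List Int) (s : PySem.Set String) :
    (x.foldl
      (fun (p : List Int × PySem.Set String) name =>
        if name ∈ p.2 then p
        else (p.1 ++ [PySem.Dict.getD namesInds name 0], PySem.Set.add p.2 name))
      (acc, s)).1 = acc ++ indsOf x s := by
  induction x generalizing acc s with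
  | nil => simp [indsOf]
  | cons n r ih =>
    simp only [List.foldl_cons, indsOf]
    by_cases h : n ∈ s
    · simp [h, ih]
    · simp [h, ih]

lemma sum_nonneg (l : List (Int × Int)) :
    0 ≤ (l.map (fun ij => if ij.1 - ij.2 < 0 then (1 : Int) else 0)).sum := by
  induction l with
  | nil => simp
  | cons a t ih => simp only [List.map_cons, List.sum_cons]; split_ifs <;> omega

lemma checkA_iff (l : List Int) :
    ((((l.drop 1).zip l.dropLast).map
        (fun (ij : Int × Int) => if ij.1 - ij.2 < 0 then (1 : Int) else 0)).sum > 0)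
      ↔ ¬ l.IsChain (· ≤ ·) := by
  induction l with
  | nil => simp
  | cons a t ih =>
    cases t with
    | nil => simp
    | cons b u =>
      have hd : (a :: b :: u).dropLast = a :: (b :: u).dropLast := by simp
      rw [hd]
      simp only [List.drop_succ_cons, List.drop_zero, List.zip_cons_cons,
        List.map_cons, List.sum_cons, List.isChain_cons_cons]
      have h2 := sum_nonneg ((b :: u).drop 1 |>.zip (b :: u).dropLast)
      simp only [List.drop_succ_cons, List.drop_zero] at ih h2 ⊢
      split_ifs with h
      · constructor
        · intro _ hc; omega
        · intro _; omega
      · constructor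
        · intro hs hc; exact (ih.mp (by omega)) hc.2
        · intro hn
          have : ¬ (b :: u).IsChain (· ≤ ·) := fun hc => hn ⟨by omega, hc⟩
          have := ih.mpr this; omega

lemma portA_eq_chain (x : List String) :
    isSCF_OrderTrueFirst x = decide ((indsOf x PySem.Set.empty).IsChain (· ≤ ·)) := by
  unfold isSCF_OrderTrueFirst
  simp only [foldlA_eq x [] PySem.Set.empty, List.nil_append]
  set l := indsOf x PySem.Set.empty with hl
  by_cases h1 : l.length = 1
  · match l, h1 with
    | [a], _ => simp
  · simp only [if_neg h1]
    by_cases h : ((((l.drop 1).zip l.dropLast).map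
        (fun (ij : Int × Int) => if ij.1 - ij.2 < 0 then (1 : Int) else 0)).sum > 0)
    · rw [if_pos h]
      simp [(checkA_iff l).mp h]
    · rw [if_neg h]
      simp [not_not.mp ((checkA_iff l).not.mp h)]

lemma altGo_eq_chain (x : List String) (s : PySem.Set String) (last : Int) :
    altGo x s last = decide ((last :: indsOf x s).IsChain (· ≤ ·)) := by
  induction x generalizing s last with
  | nil => simp [altGo, indsOf]
  | cons n r ih =>
    simp only [altGo, indsOf]
    by_cases h : n ∈ s
    · simp only [if_pos h, ih]
    · simp only [if_neg h]
      by_cases hlt : PySem.Dict.getD namesInds n 0 < last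
      · rw [if_pos hlt]
        simp [List.isChain_cons_cons, show ¬ last ≤ PySem.Dict.getD namesInds n 0 by omega]
      · rw [if_neg hlt, ih]
        simp [List.isChain_cons_cons, not_lt.mp hlt]

lemma indsOf_pos (x : List String) (s : PySem.Set String)
    (hp : ∀ a ∈ x, a = "SYMPTOM" ∨ a = "CLASSIFICATIONS" ∨ a = "FEEDBACK") :
    ∀ i ∈ indsOf x s, (1 : Int) ≤ i := by
  induction x generalizing s with
  | nil => simp [indsOf]
  | cons n r ih =>
    intro i hi
    simp only [indsOf] at hi
    by_cases h : n ∈ s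
    · rw [if_pos h] at hi
      exact ih s (fun a ha => hp a (List.mem_cons_of_mem _ ha)) i hi
    · rw [if_neg h, List.mem_cons] at hi
      rcases hi with rfl | hi
      · rcases hp n (List.mem_cons_self) with rfl | rfl | rfl <;> decide
      · exact ih _ (fun a ha => hp a (List.mem_cons_of_mem _ ha)) i hi

-- ===== VERDICT (by name: the statement is the Claim_ definition above) =====
theorem isSCF_OrderTrueFirst_spec : Claim_equal_isSCF_OrderTrueFirst := by
  intro x _ hpre
  unfold Spec_isSCF_OrderTrueFirst isSCF_OrderTrueFirst_alt
  rw [portA_eq_chain, altGo_eq_chain]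
  congr 1
  cases hL : indsOf x PySem.Set.empty with
  | nil => simp
  | cons a t =>
    have h1 : (1 : Int) ≤ a := indsOf_pos x PySem.Set.empty hpre a (by rw [hL]; exact List.mem_cons_self)
    simp only [List.isChain_cons_cons, eq_iff_iff]
    constructor
    · intro hc; exact ⟨by omega, hc⟩
    · intro hc; exact hc.2
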